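-- pv_equiv track=rewrite | github.com/grapheneaffiliate/h4-polytopic-attention | solve_arc2_train_ab.py | solve_37ce87bb
-- ===== SOURCE A (Python) =====
-- from collections import Counter, defaultdict
--
-- def solve_37ce87bb(g):
--     H,W=len(g),len(g[0]); bg=7; o=[r[:] for r in g]
--     cells=[(r,c,g[r][c]) for r in range(H) for c in range(W) if g[r][c]!=bg]
--     cg=defaultdict(list)
--     for r,c,v in cells: cg[c].append((r,v))
--     lines=[(c,sorted(cg[c])[0][0],len(cg[c]),sorted(cg[c])[0][1]) for c in sorted(cg)]
--     if not lines: return o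
--     sl=sorted(lines,key=lambda x:x[1]); cs=[l[0] for l in sl]; ss=[l[1] for l in sl]
--     if len(cs)>=2:
--         nc=cs[-1]+(cs[1]-cs[0]); ns=ss[-1]+(ss[1]-ss[0])
--     else: nc=cs[0]+2; ns=ss[0]+1
--     for r in range(max(0,ns),H):
--         if 0<=nc<W: o[r][nc]=5
--     return o
-- ===== SOURCE B (Python) =====
-- def solve_37ce87bb(g):
--     H, W = len(g), len(g[0])
--     o = [row[:] for row in g]
--     # Scanning rows top-down and columns left-to-right yields each column's first
--     # non-background cell in (first_row, col) lexicographic order, which is exactly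
--     # the order A obtains by sorting; so no dict and no sort are needed — just the
--     # first, second and last such events.
--     seen = set()
--     p0 = p1 = plast = None
--     for r in range(H):
--         row = g[r]
--         for c in range(W):
--             if row[c] != 7 and c not in seen:
--                 seen.add(c)
--                 if p0 is None:
--                     p0 = (r, c)
--                 elif p1 is None:
--                     p1 = (r, c)
--                 plast = (r, c)
--     if p0 is None:
--         return o
--     if p1 is None:
--         nc, ns = p0[1] + 2, p0[0] + 1
--     else:
--         nc = plast[1] + (p1[1] - p0[1])
--         ns = plast[0] + (p1[0] - p0[0])
--     if 0 <= nc < W: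
--         for r in range(max(0, ns), H):
--             o[r][nc] = 5
--     return o
-- ===== Notes on version B (the rewrite author's own statement) =====
-- stated objective: faster
-- what changed: Replaces A's cell-list materialisation, defaultdict grouping, per-column sorts and stable sort-by-row by a single top-down left-to-right scan with a seen-column set: the scan meets each column's first non-background cell already in (row, col) order, so no dict-of-lists and no sort exist at all, and only the first, second and last such events are kept (O(1) extra state).
import Mathlib
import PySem

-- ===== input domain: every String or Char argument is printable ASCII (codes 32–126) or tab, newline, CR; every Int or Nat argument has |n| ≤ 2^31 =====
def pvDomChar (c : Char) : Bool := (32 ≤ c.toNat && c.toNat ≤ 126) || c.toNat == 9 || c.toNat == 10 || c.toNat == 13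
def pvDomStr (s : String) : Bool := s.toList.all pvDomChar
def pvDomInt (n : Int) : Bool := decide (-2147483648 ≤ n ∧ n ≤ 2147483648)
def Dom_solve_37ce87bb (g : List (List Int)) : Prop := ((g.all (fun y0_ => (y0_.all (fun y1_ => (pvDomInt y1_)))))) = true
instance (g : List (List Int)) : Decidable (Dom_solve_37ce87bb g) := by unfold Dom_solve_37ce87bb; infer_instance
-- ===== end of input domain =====

-- B replaces A's cell-list + defaultdict grouping + per-column sorting + stable sort by a single
-- top-down left-to-right scan that meets each column's first non-background cell already in the
-- sorted (row, col) order, keeping only the first, second and last such events (no dict, no sort).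


-- ===== PORT A =====
-- g[r][c]; the defaults are unreachable inside Pre_ (0 ≤ r < len g, 0 ≤ c < len g[0] ≤ len g[r])
def pvA_at (g : List (List Int)) (r c : Int) : Int :=
  PySem.List.pyGetD (PySem.List.pyGetD g r []) c 7

def pvA_W (g : List (List Int)) : Int := ((PySem.List.pyGetD g 0 []).length : Int)   -- len(g[0])

def pvA_o (g : List (List Int)) : List (List Int) := g.map (fun r => PySem.List.slice r none none)  -- [r[:] for r in g]

-- cells=[(r,c,g[r][c]) for r in range(H) for c in range(W) if g[r][c]!=bg]
def pvA_cells (g : List (List Int)) : List (Int × Int × Int) :=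
  (PySem.List.pyRange 0 (g.length : Int) 1).flatMap (fun r =>
    ((PySem.List.pyRange 0 (pvA_W g) 1).filter (fun c => pvA_at g r c != 7)).map
      (fun c => (r, c, pvA_at g r c)))

-- cg=defaultdict(list); for r,c,v in cells: cg[c].append((r,v))
def pvA_cg (g : List (List Int)) : PySem.Dict Int (List (Int × Int)) :=
  (pvA_cells g).foldl (fun d x => d.modify x.2.1 [] (· ++ [(x.1, x.2.2)])) PySem.Dict.empty

-- lines=[(c,sorted(cg[c])[0][0],len(cg[c]),sorted(cg[c])[0][1]) for c in sorted(cg)]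
def pvA_lines (g : List (List Int)) : List (Int × Int × Int × Int) :=
  (PySem.List.sorted (pvA_cg g).keys (fun x => x) false).map (fun c =>
    (c,
     (PySem.List.pyGetD
       (PySem.List.sorted2 ((pvA_cg g).getD c []) (fun q => q.1) (fun q => q.2) false)
       0 ((0 : Int), (0 : Int))).1,
     (((pvA_cg g).getD c []).length : Int),
     (PySem.List.pyGetD
       (PySem.List.sorted2 ((pvA_cg g).getD c []) (fun q => q.1) (fun q => q.2) false)
       0 ((0 : Int), (0 : Int))).2))

-- sl=sorted(lines,key=lambda x:x[1]); cs=[l[0] for l in sl]; ss=[l[1] for l in sl]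
def pvA_sl (g : List (List Int)) : List (Int × Int × Int × Int) :=
  PySem.List.sorted (pvA_lines g) (fun x => x.2.1) false

def pvA_cs (g : List (List Int)) : List Int := (pvA_sl g).map (fun l => l.1)
def pvA_ss (g : List (List Int)) : List Int := (pvA_sl g).map (fun l => l.2.1)

def pvA_nc (g : List (List Int)) : Int :=
  if 2 ≤ (pvA_cs g).length then
    PySem.List.pyGetD (pvA_cs g) (-1) 0 +
      (PySem.List.pyGetD (pvA_cs g) 1 0 - PySem.List.pyGetD (pvA_cs g) 0 0)
  else PySem.List.pyGetD (pvA_cs g) 0 0 + 2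

def pvA_ns (g : List (List Int)) : Int :=
  if 2 ≤ (pvA_cs g).length then
    PySem.List.pyGetD (pvA_ss g) (-1) 0 +
      (PySem.List.pyGetD (pvA_ss g) 1 0 - PySem.List.pyGetD (pvA_ss g) 0 0)
  else PySem.List.pyGetD (pvA_ss g) 0 0 + 1

def solve_37ce87bb (g : List (List Int)) : List (List Int) :=
  if (pvA_lines g).isEmpty then pvA_o g
  else
    (PySem.List.pyRange (max 0 (pvA_ns g)) (g.length : Int) 1).foldl
      (fun o r =>
        if 0 ≤ pvA_nc g ∧ pvA_nc g < pvA_W g then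
          PySem.List.pySetD o r (PySem.List.pySetD (PySem.List.pyGetD o r []) (pvA_nc g) 5)
        else o)
      (pvA_o g)

-- ===== PORT B =====
def pvB_W (g : List (List Int)) : Int := ((PySem.List.pyGetD g 0 []).length : Int)   -- len(g[0])

def pvB_o (g : List (List Int)) : List (List Int) := g.map (fun row => PySem.List.slice row none none)  -- [row[:] for row in g]

-- if p0 is None: p0=(r,c) elif p1 is None: p1=(r,c) … ; plast=(r,c)
def pvB_upd (t : Option (Int × Int) × Option (Int × Int) × Option (Int × Int)) (x : Int × Int) :
    Option (Int × Int) × Option (Int × Int) × Option (Int × Int) :=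
  match t with
  | (none, _, _) => (some x, none, some x)
  | (some p0, none, _) => (some p0, some x, some x)
  | (some p0, some p1, _) => (some p0, some p1, some x)

-- the nested scan: for r in range(H): row=g[r]; for c in range(W): if row[c]!=7 and c not in seen: …
def pvB_scan (g : List (List Int)) :
    PySem.Set Int × Option (Int × Int) × Option (Int × Int) × Option (Int × Int) :=
  (PySem.List.pyRange 0 (g.length : Int) 1).foldl (fun st r =>
    (PySem.List.pyRange 0 (pvB_W g) 1).foldl (fun st c =>
      if PySem.List.pyGetD (PySem.List.pyGetD g r []) c 7 != 7 && !(PySem.Set.contains st.1 c) then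
        (PySem.Set.add st.1 c, pvB_upd st.2 (r, c))
      else st) st)
    (PySem.Set.empty, none, none, none)

-- the tail: if 0<=nc<W: for r in range(max(0,ns),H): o[r][nc]=5
def pvB_fill (g : List (List Int)) (o : List (List Int)) (nc ns : Int) : List (List Int) :=
  if 0 ≤ nc ∧ nc < pvB_W g then
    (PySem.List.pyRange (max 0 ns) (g.length : Int) 1).foldl
      (fun o r => PySem.List.pySetD o r (PySem.List.pySetD (PySem.List.pyGetD o r []) nc 5)) o
  else o

def solve_37ce87bb_alt (g : List (List Int)) : List (List Int) :=
  match (pvB_scan g).2 with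
  | (none, _, _) => pvB_o g
  | (some p0, none, _) => pvB_fill g (pvB_o g) (p0.2 + 2) (p0.1 + 1)
  | (some p0, some p1, some pl) =>
      pvB_fill g (pvB_o g) (pl.2 + (p1.2 - p0.2)) (pl.1 + (p1.1 - p0.1))
  | (some _, some _, none) => pvB_o g  -- unreachable: plast is set whenever p1 is

-- ===== PRECONDITION & SPEC =====
-- Pre_: g nonempty (A reads len(g[0])) and every row at least as long as the first
-- (A indexes g[r][c] for all c < len(g[0])).
-- This is exactly the set of inputs on which the Python A returns without raising.
def Pre_solve_37ce87bb (g : List (List Int)) : Prop :=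
  g ≠ [] ∧ ∀ row ∈ g, (g.headD []).length ≤ row.length

instance (g : List (List Int)) : Decidable (Pre_solve_37ce87bb g) := by
  unfold Pre_solve_37ce87bb; infer_instance

def pvWitness_solve_37ce87bb : List (List Int) :=
  [[7, 7, 7, 7], [0, 7, 7, 7], [7, 7, 1, 7], [7, 7, 7, 7]]

def Spec_solve_37ce87bb (g : List (List Int)) (out : List (List Int)) : Prop := out = solve_37ce87bb_alt g
instance (g : List (List Int)) (out : List (List Int)) : Decidable (Spec_solve_37ce87bb g out) := by unfold Spec_solve_37ce87bb; infer_instance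

-- ===== CLAIM (what is proved, stated in full; the proofs are below) =====
def Claim_equal_solve_37ce87bb : Prop := ∀ (g : List (List Int)), Dom_solve_37ce87bb g → Pre_solve_37ce87bb g → Spec_solve_37ce87bb g (solve_37ce87bb g)

-- ===== LEMMAS AND PROOFS =====

-- Python's tuple comparison on (Int × Int) in Prop form
def pvLex2 (a b : Int × Int) : Prop := a.1 < b.1 ∨ (a.1 = b.1 ∧ a.2 < b.2)

-- strict (minrow, col) order on A's 4-tuples, phrased through pvLex2
def pvLex4 (a b : Int × Int × Int × Int) : Prop := pvLex2 (a.2.1, a.1) (b.2.1, b.1)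

def pvLtb2 (a b : Int × Int) : Bool :=
  decide (a.1 < b.1) || !decide (b.1 < a.1) && decide (a.2 < b.2)

lemma pvLtb2_iff (a b : Int × Int) : pvLtb2 a b = true ↔ pvLex2 a b := by
  simp only [pvLtb2, pvLex2, Bool.or_eq_true, Bool.and_eq_true, Bool.not_eq_true',
    decide_eq_true_eq, decide_eq_false_iff_not]
  omega

lemma pv_sorted2_eq (xs : List (Int × Int)) :
    PySem.List.sorted2 xs (fun p => p.1) (fun p => p.2) false =
      List.foldl (fun acc x => PySem.List.insertBy pvLtb2 x acc) [] xs := rfl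

lemma pv_insertBy_nil {α : Type} (ltb : α → α → Bool) (x : α) :
    PySem.List.insertBy ltb x [] = [x] := rfl

lemma pv_insertBy_cons {α : Type} (ltb : α → α → Bool) (x y : α) (ys : List α) :
    PySem.List.insertBy ltb x (y :: ys) =
      if ltb x y = true then x :: y :: ys else y :: PySem.List.insertBy ltb x ys := rfl

-- insertion sort of an already strictly-sorted list is the list itself
lemma pv_insertSort_of_pairwise {α : Type} (ltb : α → α → Bool)
    (hasym : ∀ a b, ltb a b = true → ltb b a = false) :
    ∀ xs : List α, xs.Pairwise (fun a b => ltb a b = true) →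
      List.foldl (fun acc x => PySem.List.insertBy ltb x acc) [] xs = xs := by
  intro xs
  induction xs using List.reverseRecOn with
  | nil => intro _; rfl
  | append_singleton ys x ih =>
    intro hp
    rcases List.pairwise_append.mp hp with ⟨h1, _, h3⟩
    rw [List.foldl_append, ih h1, List.foldl_cons, List.foldl_nil]
    exact PySem.List.insertBy_of_forall_not_before _ _ _
      (fun y hy => hasym _ _ (h3 y hy x (List.mem_singleton_self x)))

lemma pv_insertBy_pairwise_lex4 (x : Int × Int × Int × Int) :
    ∀ acc : List (Int × Int × Int × Int), acc.Pairwise pvLex4 →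
      (∀ y ∈ acc, y.1 < x.1) →
      (PySem.List.insertBy (fun a b => decide (a.2.1 < b.2.1)) x acc).Pairwise pvLex4 := by
  intro acc
  induction acc with
  | nil => intro _ _; rw [pv_insertBy_nil]; exact List.pairwise_singleton _ _
  | cons y t ih =>
    intro hacc hcol
    rw [pv_insertBy_cons]
    rcases List.pairwise_cons.mp hacc with ⟨hy, ht⟩
    by_cases hxy : decide (x.2.1 < y.2.1) = true
    · rw [if_pos hxy]
      have hlt : x.2.1 < y.2.1 := of_decide_eq_true hxy
      refine List.pairwise_cons.mpr ⟨?_, hacc⟩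
      intro z hz
      rcases List.mem_cons.mp hz with rfl | hz'
      · unfold pvLex4 pvLex2; omega
      · have := hy z hz'
        unfold pvLex4 pvLex2 at *; omega
    · rw [if_neg hxy]
      have hle : y.2.1 ≤ x.2.1 := by
        have := of_decide_eq_false (Bool.of_not_eq_true hxy); omega
      have hyx : pvLex4 y x := by
        have := hcol y (List.mem_cons_self ..)
        unfold pvLex4 pvLex2; omega
      refine List.pairwise_cons.mpr
        ⟨?_, ih ht (fun z hz => hcol z (List.mem_cons_of_mem _ hz))⟩
      intro z hz
      rcases (PySem.List.mem_insertBy _ _ _ _).mp hz with rfl | hz'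
      · exact hyx
      · exact hy z hz'

lemma pv_foldl_insert_pairwise_lex4 :
    ∀ (xs acc : List (Int × Int × Int × Int)), acc.Pairwise pvLex4 →
      (∀ y ∈ acc, ∀ x ∈ xs, y.1 < x.1) →
      xs.Pairwise (fun a b => a.1 < b.1) →
      (List.foldl (fun acc x =>
          PySem.List.insertBy (fun a b => decide (a.2.1 < b.2.1)) x acc) acc xs).Pairwise pvLex4 := by
  intro xs
  induction xs with
  | nil => intro acc h _ _; simpa using h
  | cons x t ih =>
    intro acc hacc hsep hxs
    rcases List.pairwise_cons.mp hxs with ⟨hx, ht⟩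
    rw [List.foldl_cons]
    apply ih
    · exact pv_insertBy_pairwise_lex4 _ _ hacc
        (fun y hy => hsep y hy x (List.mem_cons_self ..))
    · intro y hy z hz
      rcases (PySem.List.mem_insertBy _ _ _ _).mp hy with rfl | hy'
      · exact hx z hz
      · exact hsep y hy' z (List.mem_cons_of_mem _ hz)
    · exact ht

-- first-occurrence extraction: the (col, row) pairs the scan meets, in scan order
def pvFF (l : List (Int × Int × Int)) (seen : List Int) : List (Int × Int) :=
  match l with
  | [] => []
  | x :: l' => if x.2.1 ∈ seen then pvFF l' seen else (x.2.1, x.1) :: pvFF l' (x.2.1 :: seen)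

lemma pvFF_congr : ∀ (l : List (Int × Int × Int)) (s1 s2 : List Int),
    (∀ c, c ∈ s1 ↔ c ∈ s2) → pvFF l s1 = pvFF l s2 := by
  intro l
  induction l with
  | nil => intros; rfl
  | cons x l ih =>
    intro s1 s2 h
    simp only [pvFF]
    by_cases hm : x.2.1 ∈ s1
    · rw [if_pos hm, if_pos ((h _).mp hm), ih _ _ h]
    · rw [if_neg hm, if_neg (fun hc => hm ((h _).mpr hc))]
      congr 1
      apply ih
      intro c
      simp only [List.mem_cons, h c]

lemma pvFF_fst_not_mem : ∀ (l : List (Int × Int × Int)) (seen : List Int) (p : Int × Int),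
    p ∈ pvFF l seen → p.1 ∉ seen := by
  intro l
  induction l with
  | nil => intro seen p hp; simp [pvFF] at hp
  | cons x l ih =>
    intro seen p hp
    simp only [pvFF] at hp
    by_cases hm : x.2.1 ∈ seen
    · rw [if_pos hm] at hp; exact ih _ _ hp
    · rw [if_neg hm] at hp
      rcases List.mem_cons.mp hp with rfl | hp'
      · exact hm
      · have := ih _ _ hp'
        intro hc; exact this (List.mem_cons_of_mem _ hc)

lemma pvFF_pairwise_fst : ∀ (l : List (Int × Int × Int)) (seen : List Int),
    (pvFF l seen).Pairwise (fun p q => p.1 ≠ q.1) := by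
  intro l
  induction l with
  | nil => intro seen; simp [pvFF]
  | cons x l ih =>
    intro seen
    simp only [pvFF]
    by_cases hm : x.2.1 ∈ seen
    · rw [if_pos hm]; exact ih seen
    · rw [if_neg hm]
      refine List.pairwise_cons.mpr ⟨?_, ih _⟩
      intro q hq hc
      exact (pvFF_fst_not_mem _ _ _ hq) (hc ▸ List.mem_cons_self ..)

-- the scan's output, swapped to (row, col), is a sublist of the cell stream
lemma pvFF_sublist : ∀ (l : List (Int × Int × Int)) (seen : List Int),
    ((pvFF l seen).map (fun p => (p.2, p.1))).Sublist (l.map (fun x => (x.1, x.2.1))) := by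
  intro l
  induction l with
  | nil => intro seen; simp [pvFF]
  | cons x l ih =>
    intro seen
    simp only [pvFF, List.map_cons]
    by_cases hm : x.2.1 ∈ seen
    · rw [if_pos hm]
      exact (ih seen).cons _
    · rw [if_neg hm]
      simp only [List.map_cons]
      exact (ih _).cons₂ _

lemma pvFF_head : ∀ (l : List (Int × Int × Int)) (seen : List Int) (c r : Int),
    (c, r) ∈ pvFF l seen →
    ∃ v rest, l.filter (fun x => x.2.1 == c) = (r, c, v) :: rest := by
  intro l
  induction l with
  | nil => intro seen c r hm; simp [pvFF] at hm
  | cons x l ih =>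
    intro seen c r hm
    simp only [pvFF] at hm
    by_cases hx : x.2.1 ∈ seen
    · rw [if_pos hx] at hm
      have hcnot : c ∉ seen := pvFF_fst_not_mem _ _ _ hm
      have hne : (x.2.1 == c) = false := by
        simp only [beq_eq_false_iff_ne, ne_eq]
        intro h; exact hcnot (h ▸ hx)
      rw [List.filter_cons, hne]
      simpa using ih _ _ _ hm
    · rw [if_neg hx] at hm
      rcases List.mem_cons.mp hm with heq | hm'
      · obtain ⟨hc, hr⟩ := Prod.mk.injEq .. ▸ heq
        rw [List.filter_cons]
        have hbeq : (x.2.1 == c) = true := by simp [hc]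
        rw [hbeq]
        simp only [if_true]
        exact ⟨x.2.2, l.filter (fun y => y.2.1 == c), by
          rw [hr, hc]⟩
      · have hcnot : c ∉ x.2.1 :: seen := pvFF_fst_not_mem _ _ _ hm'
        have hne : (x.2.1 == c) = false := by
          simp only [beq_eq_false_iff_ne, ne_eq]
          intro h; exact hcnot (by simp [h])
        rw [List.filter_cons, hne]
        simpa using ih _ _ _ hm'

lemma pv_cg_keys : ∀ (l : List (Int × Int × Int)) (d : PySem.Dict Int (List (Int × Int))),
    d.keys.Nodup →
    (List.foldl (fun d (x : Int × Int × Int) =>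
        d.modify x.2.1 [] (· ++ [(x.1, x.2.2)])) d l).keys
      = d.keys ++ (pvFF l d.keys).map (fun p => p.1) := by
  intro l
  induction l with
  | nil => intro d _; simp [pvFF]
  | cons x l ih =>
    intro d hd
    rw [List.foldl_cons]
    have hkeq : (d.modify x.2.1 [] (· ++ [(x.1, x.2.2)])).keys
        = (d.insert x.2.1 ((d.getD x.2.1 []) ++ [(x.1, x.2.2)])).keys :=
      PySem.Dict.keys_modify d _ _ _
    by_cases hc : d.contains x.2.1 = true
    · have hmem : x.2.1 ∈ d.keys := (PySem.Dict.contains_iff_mem_keys _ _).mp hc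
      have hkeys : (d.modify x.2.1 [] (· ++ [(x.1, x.2.2)])).keys = d.keys := by
        rw [hkeq, PySem.Dict.keys_insert_of_contains d _ hc]
      have hnd : (d.modify x.2.1 [] (· ++ [(x.1, x.2.2)])).keys.Nodup := by
        rw [hkeys]; exact hd
      rw [ih _ hnd, hkeys]
      simp only [pvFF]
      rw [if_pos hmem]
    · have hcf : d.contains x.2.1 = false := Bool.eq_false_iff.mpr hc
      have hmem : x.2.1 ∉ d.keys := fun h =>
        hc ((PySem.Dict.contains_iff_mem_keys _ _).mpr h)
      have hkeys : (d.modify x.2.1 [] (· ++ [(x.1, x.2.2)])).keys = d.keys ++ [x.2.1] := by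
        rw [hkeq, PySem.Dict.keys_insert_of_not_contains d _ hcf]
      have hnd : (d.modify x.2.1 [] (· ++ [(x.1, x.2.2)])).keys.Nodup := by
        rw [hkeq]; exact PySem.Dict.nodup_keys_insert _ _ _ hd
      rw [ih _ hnd, hkeys]
      rw [pvFF_congr l (d.keys ++ [x.2.1]) (x.2.1 :: d.keys)
        (by intro c; simp [List.mem_append, List.mem_cons, or_comm])]
      simp only [pvFF]
      rw [if_neg hmem, List.append_assoc]
      rfl

lemma pv_W_eq (g : List (List Int)) : pvB_W g = pvA_W g := rfl

-- B's conditional-insert scan, flattened to a fold over A's cell list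
def pvStepT (st : PySem.Set Int × Option (Int × Int) × Option (Int × Int) × Option (Int × Int))
    (x : Int × Int × Int) :
    PySem.Set Int × Option (Int × Int) × Option (Int × Int) × Option (Int × Int) :=
  if PySem.Set.contains st.1 x.2.1 then st
  else (PySem.Set.add st.1 x.2.1, pvB_upd st.2 (x.1, x.2.1))

lemma pv_scan_eq (g : List (List Int)) :
    pvB_scan g = List.foldl pvStepT (PySem.Set.empty, none, none, none) (pvA_cells g) := by
  unfold pvB_scan pvA_cells
  rw [List.foldl_flatMap]
  apply PySem.List.foldl_congr_mem
  intro st r _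
  rw [List.foldl_map, List.foldl_filter]
  apply PySem.List.foldl_congr_mem
  intro acc c _
  show (if pvA_at g r c != 7 && !(PySem.Set.contains acc.1 c) then
      (PySem.Set.add acc.1 c, pvB_upd acc.2 (r, c)) else acc)
    = (if pvA_at g r c != 7 then pvStepT acc (r, c, pvA_at g r c) else acc)
  by_cases hv : (pvA_at g r c != 7) = true
  · rw [hv]
    unfold pvStepT
    simp
  · rw [Bool.eq_false_iff.mpr hv]
    simp

-- the triple component of the flattened scan is a plain fold over the first-occurrence pairs
lemma pv_scan_snd : ∀ (l : List (Int × Int × Int)) (s : PySem.Set Int)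
    (t : Option (Int × Int) × Option (Int × Int) × Option (Int × Int)),
    (List.foldl pvStepT (s, t) l).2
      = List.foldl pvB_upd t ((pvFF l s).map (fun p => (p.2, p.1))) := by
  intro l
  induction l with
  | nil => intro s t; simp [pvFF]
  | cons x l ih =>
    intro s t
    rw [List.foldl_cons]
    by_cases hm : x.2.1 ∈ s
    · have hc : PySem.Set.contains s x.2.1 = true := by
        simp [PySem.Set.contains, hm]
      rw [show pvStepT (s, t) x = (s, t) by unfold pvStepT; rw [hc]; rfl]
      simp only [pvFF]
      rw [if_pos hm, ih]
    · have hc : PySem.Set.contains s x.2.1 = false := by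
        simp [PySem.Set.contains, hm]
      rw [show pvStepT (s, t) x
          = (PySem.Set.add s x.2.1, pvB_upd t (x.1, x.2.1)) by unfold pvStepT; rw [hc]; rfl]
      simp only [pvFF]
      rw [if_neg hm, ih]
      have hadd : PySem.Set.add s x.2.1 = s ++ [x.2.1] := by
        simp [PySem.Set.add, PySem.Set.contains, hm]
      rw [hadd, pvFF_congr l (s ++ [x.2.1]) (x.2.1 :: s)
        (by intro c; simp [List.mem_append, List.mem_cons, or_comm])]
      rfl

-- after two events the triple only tracks the last event
lemma pv_upd_two : ∀ (t : List (Int × Int)) (x y z : Int × Int),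
    List.foldl pvB_upd (some x, some y, some z) t = (some x, some y, some (t.getLastD z)) := by
  intro t
  induction t with
  | nil => intro x y z; rfl
  | cons a t ih =>
    intro x y z
    rw [List.foldl_cons]
    show List.foldl pvB_upd (some x, some y, some a) t = _
    rw [ih, List.getLastD_cons]

-- ALIGN is filled below: pairs in scan order
def pvPairs (g : List (List Int)) : List (Int × Int) :=
  (pvFF (pvA_cells g) []).map (fun p => (p.2, p.1))

lemma pv_scan_pairs (g : List (List Int)) :
    (pvB_scan g).2 = List.foldl pvB_upd (none, none, none) (pvPairs g) := by
  rw [pv_scan_eq, pv_scan_snd]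
  rfl

lemma pv_cells_pairwise (g : List (List Int)) :
    (pvA_cells g).Pairwise (fun a b => a.1 < b.1 ∨ (a.1 = b.1 ∧ a.2.1 < b.2.1)) := by
  unfold pvA_cells
  rw [List.pairwise_flatMap]
  constructor
  · intro r _
    rw [List.pairwise_map]
    apply List.Pairwise.imp ?_
      (List.Pairwise.filter _ (PySem.List.pairwise_lt_pyRange_one 0 (pvA_W g)))
    intro c c' hcc
    exact Or.inr ⟨rfl, hcc⟩
  · apply List.Pairwise.imp ?_ (PySem.List.pairwise_lt_pyRange_one 0 (g.length : Int))
    · intro r r' hrr x hx y hy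
      rcases List.mem_map.mp hx with ⟨c, _, rfl⟩
      rcases List.mem_map.mp hy with ⟨c', _, rfl⟩
      exact Or.inl hrr

lemma pv_pairs_pairwise (g : List (List Int)) : (pvPairs g).Pairwise pvLex2 := by
  have hs := pvFF_sublist (pvA_cells g) []
  have hcells : ((pvA_cells g).map (fun x => (x.1, x.2.1))).Pairwise pvLex2 := by
    rw [List.pairwise_map]
    exact (pv_cells_pairwise g).imp (fun h => h)
  exact hcells.sublist hs

lemma pv_pairwise_filter_mem {α : Type} (p : α → Bool) {R : α → α → Prop} :
    ∀ l : List α, l.Pairwise R →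
      (l.filter p).Pairwise (fun a b => R a b ∧ p a = true ∧ p b = true) := by
  intro l
  induction l with
  | nil => intro _; simp
  | cons x l ih =>
    intro h
    rcases List.pairwise_cons.mp h with ⟨hx, hl⟩
    rw [List.filter_cons]
    by_cases hp : p x = true
    · rw [if_pos hp]
      refine List.pairwise_cons.mpr ⟨?_, ih hl⟩
      intro b hb
      exact ⟨hx b (List.mem_of_mem_filter hb), hp, List.of_mem_filter hb⟩
    · rw [if_neg hp]; exact ih hl

lemma pv_group (g : List (List Int)) (c : Int) :
    (pvA_cg g).getD c [] =
      ((pvA_cells g).filter (fun x => x.2.1 == c)).map (fun x => (x.1, x.2.2)) := by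
  unfold pvA_cg
  have hmap := (List.foldl_map (f := fun (x : Int × Int × Int) => (x.2.1, (x.1, x.2.2)))
    (g := fun d (p : Int × (Int × Int)) => d.modify p.1 [] (· ++ [p.2]))
    (l := pvA_cells g) (init := PySem.Dict.empty)).symm
  rw [show List.foldl (fun d (x : Int × Int × Int) => d.modify x.2.1 [] (· ++ [(x.1, x.2.2)]))
      PySem.Dict.empty (pvA_cells g)
    = List.foldl (fun d (p : Int × (Int × Int)) => d.modify p.1 [] (· ++ [p.2]))
      PySem.Dict.empty ((pvA_cells g).map (fun x => (x.2.1, (x.1, x.2.2)))) from hmap]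
  rw [PySem.Dict.getD_foldl_modify_append, List.filter_map, List.map_map]
  rw [PySem.Dict.getD_of_not_contains _ _ (by rw [PySem.Dict.contains_empty])]
  rfl

lemma pv_group_pairwise (g : List (List Int)) (c : Int) :
    (((pvA_cells g).filter (fun x => x.2.1 == c)).map
      (fun x => ((x.1 : Int), (x.2.2 : Int)))).Pairwise (fun p q => p.1 < q.1) := by
  rw [List.pairwise_map]
  apply List.Pairwise.imp ?_
    (pv_pairwise_filter_mem (fun x => x.2.1 == c) _ (pv_cells_pairwise g))
  rintro a b ⟨hR, ha, hb⟩
  have hac : a.2.1 = c := by simpa using ha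
  have hbc : b.2.1 = c := by simpa using hb
  rcases hR with h | ⟨-, h⟩
  · exact h
  · omega

lemma pv_sorted_group (g : List (List Int)) (c : Int) :
    PySem.List.sorted2 ((pvA_cg g).getD c []) (fun p => p.1) (fun p => p.2) false
      = (pvA_cg g).getD c [] := by
  rw [pv_sorted2_eq]
  apply pv_insertSort_of_pairwise
  · intro a b h
    rw [pvLtb2_iff] at h
    rw [Bool.eq_false_iff]
    intro hba
    rw [pvLtb2_iff] at hba
    unfold pvLex2 at *
    omega
  · rw [pv_group]
    apply List.Pairwise.imp ?_ (pv_group_pairwise g c)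
    intro a b h
    rw [pvLtb2_iff]
    exact Or.inl h

lemma pv_keysA (g : List (List Int)) :
    (pvA_cg g).keys = (pvFF (pvA_cells g) []).map (fun p => p.1) := by
  unfold pvA_cg
  have h := pv_cg_keys (pvA_cells g) PySem.Dict.empty
    (by rw [PySem.Dict.keys_empty]; exact List.nodup_nil)
  rw [PySem.Dict.keys_empty] at h
  simpa using h

lemma pv_s_eq (g : List (List Int)) : ∀ p ∈ pvFF (pvA_cells g) [],
    (PySem.List.pyGetD
      (PySem.List.sorted2 ((pvA_cg g).getD p.1 []) (fun q => q.1) (fun q => q.2) false)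
      0 ((0 : Int), (0 : Int))).1 = p.2 := by
  rintro ⟨c, r⟩ hp
  obtain ⟨v, rest, hf⟩ := pvFF_head _ _ c r hp
  rw [pv_sorted_group, pv_group, hf]
  simp [PySem.List.pyGetD_zero_cons]

-- pyGetD through the projections used at the end
lemma pv_getD_swap (sl : List (Int × Int × Int × Int)) (k : Int) :
    PySem.List.pyGetD (sl.map (fun l => (l.2.1, l.1))) k ((0 : Int), (0 : Int))
      = ((PySem.List.pyGetD sl k (0, 0, 0, 0)).2.1, (PySem.List.pyGetD sl k (0, 0, 0, 0)).1) :=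
  PySem.List.pyGetD_map (fun l => (l.2.1, l.1)) sl k (0, 0, 0, 0)

lemma pv_getD_fst (sl : List (Int × Int × Int × Int)) (k : Int) :
    PySem.List.pyGetD (sl.map (fun l => l.1)) k (0 : Int)
      = (PySem.List.pyGetD sl k (0, 0, 0, 0)).1 :=
  PySem.List.pyGetD_map (fun l => l.1) sl k (0, 0, 0, 0)

lemma pv_getD_snd (sl : List (Int × Int × Int × Int)) (k : Int) :
    PySem.List.pyGetD (sl.map (fun l => l.2.1)) k (0 : Int)
      = (PySem.List.pyGetD sl k (0, 0, 0, 0)).2.1 :=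
  PySem.List.pyGetD_map (fun l => l.2.1) sl k (0, 0, 0, 0)

-- the central bridge: A's stably-sorted lines, projected to (minrow, col), are the scan pairs
lemma pv_key (g : List (List Int)) :
    (pvA_sl g).map (fun l => (l.2.1, l.1)) = pvPairs g := by
  have hkeysnd : ((pvFF (pvA_cells g) []).map (fun p => p.1)).Nodup :=
    List.pairwise_map.mpr (pvFF_pairwise_fst _ _)
  have hsorted_keys_lt :
      (PySem.List.sorted (pvA_cg g).keys (fun x => x) false).Pairwise (· < ·) := by
    have h1 := PySem.List.sorted_pairwise (pvA_cg g).keys (fun x => x)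
    have h2 : (PySem.List.sorted (pvA_cg g).keys (fun x => x) false).Nodup :=
      ((PySem.List.sorted_perm _ _ _).nodup_iff).mpr (by rw [pv_keysA]; exact hkeysnd)
    exact List.Pairwise.imp₂ (fun a b hle hne => lt_of_le_of_ne hle hne) h1 h2
  have hlines : (pvA_lines g).Pairwise (fun a b => a.1 < b.1) := by
    unfold pvA_lines
    rw [List.pairwise_map]
    exact hsorted_keys_lt.imp (fun h => h)
  have hsl4 : (pvA_sl g).Pairwise pvLex4 := by
    unfold pvA_sl
    rw [PySem.List.sorted_eq_foldl_insertBy]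
    exact pv_foldl_insert_pairwise_lex4 _ [] (by simp) (by simp) hlines
  have hLpair : ((pvA_sl g).map (fun l => (l.2.1, l.1))).Pairwise pvLex2 := by
    rw [List.pairwise_map]
    exact hsl4.imp (fun h => h)
  have hRpair : (pvPairs g).Pairwise pvLex2 := pv_pairs_pairwise g
  have hmid : (pvA_lines g).map (fun l => (l.2.1, l.1))
      = ((PySem.List.sorted (pvA_cg g).keys (fun x => x) false).map
          (fun c => ((PySem.List.pyGetD
            (PySem.List.sorted2 ((pvA_cg g).getD c []) (fun q => q.1) (fun q => q.2) false)
            0 ((0 : Int), (0 : Int))).1, c))) := by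
    unfold pvA_lines
    rw [List.map_map]
    rfl
  have hperm : ((pvA_sl g).map (fun l => (l.2.1, l.1))).Perm (pvPairs g) := by
    have p1 : ((pvA_sl g).map (fun l => (l.2.1, l.1))).Perm
        ((pvA_lines g).map (fun l => (l.2.1, l.1))) :=
      (PySem.List.sorted_perm _ _ _).map _
    have p2 : ((PySem.List.sorted (pvA_cg g).keys (fun x => x) false).map
        (fun c => ((PySem.List.pyGetD
          (PySem.List.sorted2 ((pvA_cg g).getD c []) (fun q => q.1) (fun q => q.2) false)
          0 ((0 : Int), (0 : Int))).1, c))).Perm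
        (((pvA_cg g).keys).map
          (fun c => ((PySem.List.pyGetD
            (PySem.List.sorted2 ((pvA_cg g).getD c []) (fun q => q.1) (fun q => q.2) false)
            0 ((0 : Int), (0 : Int))).1, c))) :=
      (PySem.List.sorted_perm _ _ _).map _
    have hmap2 : (((pvA_cg g).keys).map
        (fun c => ((PySem.List.pyGetD
          (PySem.List.sorted2 ((pvA_cg g).getD c []) (fun q => q.1) (fun q => q.2) false)
          0 ((0 : Int), (0 : Int))).1, c)))
        = pvPairs g := by
      unfold pvPairs
      rw [pv_keysA, List.map_map]
      apply List.map_congr_left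
      intro p hp
      have := pv_s_eq g p hp
      simp only [Function.comp]
      rw [this]
    exact (hmid ▸ p1).trans (hmap2 ▸ p2)
  exact List.Perm.eq_of_pairwise
    (fun a b _ _ h1 h2 => absurd h2 (by unfold pvLex2 at *; omega))
    hLpair hRpair hperm

lemma pv_cs_eq_map (g : List (List Int)) : pvA_cs g = (pvA_sl g).map (fun l => l.1) := rfl
lemma pv_ss_eq_map (g : List (List Int)) : pvA_ss g = (pvA_sl g).map (fun l => l.2.1) := rfl

-- A's nc/ns, re-expressed through the scan pairs
lemma pv_nc_pairs (g : List (List Int)) :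
    pvA_nc g = (if 2 ≤ (pvPairs g).length then
        (PySem.List.pyGetD (pvPairs g) (-1) (0, 0)).2 +
          ((PySem.List.pyGetD (pvPairs g) 1 (0, 0)).2 - (PySem.List.pyGetD (pvPairs g) 0 (0, 0)).2)
      else (PySem.List.pyGetD (pvPairs g) 0 (0, 0)).2 + 2) := by
  unfold pvA_nc
  rw [← pv_key g, pv_cs_eq_map]
  simp only [List.length_map, pv_getD_swap, pv_getD_fst]

lemma pv_ns_pairs (g : List (List Int)) :
    pvA_ns g = (if 2 ≤ (pvPairs g).length then
        (PySem.List.pyGetD (pvPairs g) (-1) (0, 0)).1 +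
          ((PySem.List.pyGetD (pvPairs g) 1 (0, 0)).1 - (PySem.List.pyGetD (pvPairs g) 0 (0, 0)).1)
      else (PySem.List.pyGetD (pvPairs g) 0 (0, 0)).1 + 1) := by
  unfold pvA_ns
  rw [← pv_key g, pv_cs_eq_map, pv_ss_eq_map]
  simp only [List.length_map, pv_getD_swap, pv_getD_snd]

lemma pv_empty_iff (g : List (List Int)) :
    (pvA_lines g).isEmpty = true ↔ pvPairs g = [] := by
  have h1 : (pvA_lines g).length = (pvPairs g).length := by
    unfold pvA_lines pvPairs
    rw [List.length_map, (PySem.List.sorted_perm _ _ _).length_eq, pv_keysA,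
      List.length_map, List.length_map]
  rw [List.isEmpty_iff_length_eq_zero, h1, List.length_eq_zero_iff]

lemma pv_o_eq (g : List (List Int)) : pvB_o g = pvA_o g := rfl

-- A's whole tail, phrased as pvB_fill
lemma pv_A_fill (g : List (List Int)) (h : (pvA_lines g).isEmpty = false) :
    solve_37ce87bb g = pvB_fill g (pvA_o g) (pvA_nc g) (pvA_ns g) := by
  unfold solve_37ce87bb pvB_fill
  rw [if_neg (by simp [h]), pv_W_eq]
  by_cases hC : 0 ≤ pvA_nc g ∧ pvA_nc g < pvA_W g
  · rw [if_pos hC]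
    exact PySem.List.foldl_congr_mem _ _ _ _ (fun acc r _ => by rw [if_pos hC])
  · rw [if_neg hC]
    rw [PySem.List.foldl_congr_mem _ _ (fun (o : List (List Int)) (_ : Int) => o) _
      (fun acc r _ => by rw [if_neg hC])]
    exact List.foldl_fixed _

-- ===== VERDICT (by name: the statement is the Claim_ definition above) =====
theorem solve_37ce87bb_spec : Claim_equal_solve_37ce87bb := by
  unfold Claim_equal_solve_37ce87bb
  intro g _hdom _hpre
  unfold Spec_solve_37ce87bb
  unfold solve_37ce87bb_alt
  rw [pv_scan_pairs]
  rcases hps : pvPairs g with _ | ⟨x, _ | ⟨y, t⟩⟩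
  · -- no pairs: lines empty, both sides return o
    have hE : (pvA_lines g).isEmpty = true := (pv_empty_iff g).mpr hps
    rw [List.foldl_nil]
    show solve_37ce87bb g = pvB_o g
    unfold solve_37ce87bb
    rw [if_pos hE, pv_o_eq]
  · -- exactly one pair
    have hE : (pvA_lines g).isEmpty = false := by
      rw [Bool.eq_false_iff]
      intro hc
      rw [(pv_empty_iff g).mp hc] at hps
      simp at hps
    rw [List.foldl_cons, List.foldl_nil]
    show solve_37ce87bb g = pvB_fill g (pvB_o g) (x.2 + 2) (x.1 + 1)
    rw [pv_A_fill g hE, pv_o_eq, pv_nc_pairs, pv_ns_pairs, hps]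
    norm_num [PySem.List.pyGetD_zero_cons]
  · -- two or more pairs
    have hE : (pvA_lines g).isEmpty = false := by
      rw [Bool.eq_false_iff]
      intro hc
      rw [(pv_empty_iff g).mp hc] at hps
      simp at hps
    rw [List.foldl_cons, List.foldl_cons]
    show solve_37ce87bb g =
      (match List.foldl pvB_upd (some x, some y, some y) t with
        | (none, _, _) => pvB_o g
        | (some p0, none, _) => pvB_fill g (pvB_o g) (p0.2 + 2) (p0.1 + 1)
        | (some p0, some p1, some pl) =>
            pvB_fill g (pvB_o g) (pl.2 + (p1.2 - p0.2)) (pl.1 + (p1.1 - p0.1))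
        | (some _, some _, none) => pvB_o g)
    rw [pv_upd_two]
    show solve_37ce87bb g =
      pvB_fill g (pvB_o g) ((t.getLastD y).2 + (y.2 - x.2)) ((t.getLastD y).1 + (y.1 - x.1))
    rw [pv_A_fill g hE, pv_o_eq, pv_nc_pairs, pv_ns_pairs, hps]
    have hlen : 2 ≤ (x :: y :: t).length := by simp
    have hne : (x :: y :: t) ≠ ([] : List (Int × Int)) := by simp
    rw [if_pos hlen, if_pos hlen,
      PySem.List.pyGetD_neg_one _ ((0 : Int), (0 : Int)) hne]
    have hlast : (x :: y :: t).getLast hne = t.getLastD y := by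
      rw [List.getLast_cons (by simp), List.getLast_eq_getLastD]
    rw [hlast]
    norm_num [PySem.List.pyGetD_zero_cons, PySem.List.pyGetD_ofNat']
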